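-- pv_equiv track=rewrite | github.com/aaronstanek/PythonPasswordUtility | pu.py | generate_password_resolve_charstring
-- ===== SOURCE A (Python) =====
-- generate_password_character_ranges = {
--     "c": list(range(65,91)),
--     "l": list(range(97,123)),
--     "n": list(range(48,58)),
--     "p": list(map(ord,[
--         "`","~","!","@","#",
--         "$","%","^","&","*",
--         "(",")","-","_","=",
--         "+","[","{","]","}",
--         "\\","|",";",":","\'",
--         "\"",",","<",".",">",
--         "/","?"
--         ])),
--     "r": list(map(ord,[
--         "!","@","#","$","%",
--         "&","*","(",")","-",
--         "_","+","[","{","]",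
--         "}",";",":",",",".",
--         "?"
--         ])),
--     "s": [32]
-- }
--
-- def generate_password_resolve_charstring(s):
--     # if a string is passed as valid_chars to
--     # generate_password, it will need to be
--     # resolved to a set
--     # first expand shorthands
--     se = ""
--     for i in range(len(s)):
--         if s[i] == "i" or s[i] == "e":
--             se += s[i:]
--             break
--         if s[i] in generate_password_character_ranges:
--             se += s[i]
--         elif s[i] == "a":
--             if i == len(s) - 1:
--                 se += "clnps"
--             elif s[i+1] == "r":
--                 se += "clnrs"
--             else:
--                 se += "clnps"
--         elif s[i] == "z":
--             if i == len(s) - 1: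
--                 se += "clnp"
--             elif s[i+1] == "r":
--                 se += "clnr"
--             else:
--                 se += "clnp"
--         elif s[i] == "r":
--             if i == 0:
--                 raise ValueError("valid_chars string cannot start with \"r\"")
--             if s[i-1] != "a" or s[i-1] != "z":
--                 raise ValueError("valid_chars \"r\" can only appear after \"a\" or \"z\"")
--         else:
--             raise ValueError("valid_chars unexpected character")
--     active_array = None
--     i = []
--     e = []
--     for c in se:
--         if c == "i":
--             active_array = i
--         elif c == "e":
--             active_array = e
--         elif active_array is None:
--             # we have already checked that the character is valid
--             i += generate_password_character_ranges[c]
--         else: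
--             value = ord(c)
--             # must be ASCII printable
--             if (value < 32 or value > 127):
--                 raise ValueError("valid_chars must be ASCII printable")
--             active_array.append(value)
--     # now create a set
--     output = set(i)
--     for n in e:
--         output.discard(n)
--     return output
-- ===== SOURCE B (Python) =====
-- generate_password_character_ranges = {
--     "c": list(range(65, 91)),
--     "l": list(range(97, 123)),
--     "n": list(range(48, 58)),
--     "p": list(map(ord, [
--         "`", "~", "!", "@", "#", "$", "%", "^", "&", "*", "(", ")", "-", "_",
--         "=", "+", "[", "{", "]", "}", "\\", "|", ";", ":", "'", "\"", ",",
--         "<", ".", ">", "/", "?"])),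
--     "r": list(map(ord, [
--         "!", "@", "#", "$", "%", "&", "*", "(", ")", "-", "_", "+", "[", "{",
--         "]", "}", ";", ":", ",", ".", "?"])),
--     "s": [32],
-- }
--
--
-- def generate_password_resolve_charstring(s):
--     # single pass, no intermediate expanded string:
--     # split at the first 'i'/'e', expand the shorthand head directly into
--     # an include list, then fold the literal tail with an include/exclude mode
--     ranges = generate_password_character_ranges
--     k = len(s)
--     for j, ch in enumerate(s):
--         if ch == "i" or ch == "e":
--             k = j
--             break
--     head, tail = s[:k], s[k:]
--     include = []
--     for j, ch in enumerate(head):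
--         if ch == "a" or ch == "z":
--             next_r = j + 1 < len(head) and head[j + 1] == "r"
--             keys = ("clnr" if next_r else "clnp") + ("s" if ch == "a" else "")
--             for key in keys:
--                 include.extend(ranges[key])
--         elif ch in ranges:
--             include.extend(ranges[ch])
--         else:
--             raise ValueError("valid_chars unexpected character")
--     exclude = []
--     mode_include = True
--     for ch in tail:
--         if ch == "i":
--             mode_include = True
--         elif ch == "e":
--             mode_include = False
--         else:
--             value = ord(ch)
--             if value < 32 or value > 127:
--                 raise ValueError("valid_chars must be ASCII printable")
--             (include if mode_include else exclude).append(value)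
--     out = set(include)
--     out.difference_update(exclude)
--     return out
-- ===== Notes on version B (the rewrite author's own statement) =====
-- stated objective: alternative
-- what changed: B eliminates A's intermediate expanded-shorthand string and its second pass: it splits the input at the first 'i'/'e', expands the shorthand head directly into the include list, and folds the literal tail once with an include/exclude mode.
import Mathlib
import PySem

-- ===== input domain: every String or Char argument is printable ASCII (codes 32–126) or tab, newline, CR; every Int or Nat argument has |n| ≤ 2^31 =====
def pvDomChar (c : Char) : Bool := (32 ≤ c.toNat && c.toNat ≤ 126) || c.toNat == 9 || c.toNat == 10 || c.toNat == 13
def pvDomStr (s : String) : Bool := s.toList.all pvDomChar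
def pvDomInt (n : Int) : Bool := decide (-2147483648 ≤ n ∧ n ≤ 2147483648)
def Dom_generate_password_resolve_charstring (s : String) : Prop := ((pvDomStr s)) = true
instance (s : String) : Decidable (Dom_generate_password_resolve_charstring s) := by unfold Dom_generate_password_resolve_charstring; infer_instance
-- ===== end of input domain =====

-- B drops A's intermediate expanded-shorthand string: it splits the input at the first 'i'/'e',
-- expands the shorthand head directly into the include list, and folds the literal tail once
-- with an include/exclude mode (objective: alternative decomposition, same cost).

-- ===== PORT A =====
-- the module-level dict generate_password_character_ranges
def pwRanges : PySem.Dict Char (List Int) := PySem.Dict.ofList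
  [ ('c', PySem.List.pyRange 65 91 1)
  , ('l', PySem.List.pyRange 97 123 1)
  , ('n', PySem.List.pyRange 48 58 1)
  , ('p', [96,126,33,64,35,36,37,94,38,42,40,41,45,95,61,43,91,123,93,125,92,124,59,58,39,34,44,60,46,62,47,63])
  , ('r', [33,64,35,36,37,38,42,40,41,45,95,43,91,123,93,125,59,58,44,46,63])
  , ('s', [32]) ]

-- pass 1 of A: expand shorthands into the string `se`; `none` = ValueError.
-- A's two-step lookahead (`if i == len(s)-1 … elif s[i+1] == "r" … else …`) is written as the
-- single test `rest.head? = some 'r'` (exact: head? of [] is none ≠ some 'r').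
-- The `elif s[i] == "r": raise` branch of A is dead code — 'r' is a key of the dict, so it is
-- caught by the membership branch above; both raise paths land in the final `none`.
def pwExpand : List Char → Option (List Char)
  | [] => some []
  | c :: rest =>
    if c = 'i' ∨ c = 'e' then some (c :: rest)       -- se += s[i:]; break
    else if pwRanges.contains c then (pwExpand rest).map (fun t => c :: t)
    else if c = 'a' then
      (pwExpand rest).map (fun t =>
        (if rest.head? = some 'r' then ['c','l','n','r','s'] else ['c','l','n','p','s']) ++ t)
    else if c = 'z' then
      (pwExpand rest).map (fun t =>
        (if rest.head? = some 'r' then ['c','l','n','r'] else ['c','l','n','p']) ++ t)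
    else none                                        -- raise ValueError

-- pass 2 of A, one loop step over `se`; state = (active_array, i, e); `none` = ValueError
def pwStep2 (st : Option (Option Bool × List Int × List Int)) (c : Char) :
    Option (Option Bool × List Int × List Int) :=
  match st with
  | none => none
  | some (act, iL, eL) =>
    if c = 'i' then some (some true, iL, eL)
    else if c = 'e' then some (some false, iL, eL)
    else
      match act with
      | none => some (none, iL ++ pwRanges.getD c [], eL)
      | some b =>
        let v : Int := c.toNat
        if v < 32 ∨ v > 127 then none
        else if b then some (act, iL ++ [v], eL) else some (act, iL, eL ++ [v])

def generate_password_resolve_charstring (s : String) : List Int :=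
  match pwExpand s.toList with
  | none => []        -- ValueError in pass 1 (excluded by Pre_)
  | some se =>
    match se.foldl pwStep2 (some (none, [], [])) with
    | none => []      -- ValueError in pass 2 (excluded by Pre_)
    | some (_, iL, eL) =>
      eL.foldl (fun st n => PySem.Set.discard st n) (PySem.Set.ofList iL)

-- ===== PORT B =====
-- expand the shorthand head directly into the include list; `none` = ValueError
def pwHead : List Char → Option (List Int)
  | [] => some []
  | c :: rest =>
    if c = 'a' ∨ c = 'z' then
      let keys :=
        (if rest.head? = some 'r' then ['c','l','n','r'] else ['c','l','n','p'])
          ++ (if c = 'a' then ['s'] else [])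
      (pwHead rest).map (fun t => keys.flatMap (fun k => pwRanges.getD k []) ++ t)
    else if pwRanges.contains c then (pwHead rest).map (fun t => pwRanges.getD c [] ++ t)
    else none

-- fold the literal tail with an include/exclude mode; `none` = ValueError
def pwTail (m : Bool) (iL eL : List Int) : List Char → Option (List Int × List Int)
  | [] => some (iL, eL)
  | c :: rest =>
    if c = 'i' then pwTail true iL eL rest
    else if c = 'e' then pwTail false iL eL rest
    else
      let v : Int := c.toNat
      if v < 32 ∨ v > 127 then none
      else if m then pwTail m (iL ++ [v]) eL rest else pwTail m iL (eL ++ [v]) rest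

def generate_password_resolve_charstring_alt (s : String) : List Int :=
  let cs := s.toList
  let head := cs.takeWhile (fun c => ¬ (c = 'i' ∨ c = 'e'))
  let tail := cs.dropWhile (fun c => ¬ (c = 'i' ∨ c = 'e'))
  match pwHead head with
  | none => []        -- ValueError (excluded by Pre_)
  | some inc =>
    match pwTail true inc [] tail with
    | none => []      -- ValueError (excluded by Pre_)
    | some (iL, eL) =>
      eL.foldl (fun st n => PySem.Set.discard st n) (PySem.Set.ofList iL)

-- ===== PRECONDITION & SPEC =====
-- Pre_ = exactly where the Python A returns: before the first 'i'/'e' every character is one of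
-- "clnprsaz" (anything else raises ValueError), and from the first 'i'/'e' on every character has
-- code 32..127 (otherwise ValueError "valid_chars must be ASCII printable").
def Pre_generate_password_resolve_charstring (s : String) : Prop :=
  ((s.toList.takeWhile (fun c => ¬ (c = 'i' ∨ c = 'e'))).all
      (fun c => c ∈ (['c','l','n','p','r','s','a','z'] : List Char)) = true) ∧
  ((s.toList.dropWhile (fun c => ¬ (c = 'i' ∨ c = 'e'))).all
      (fun c => 32 ≤ c.toNat && c.toNat ≤ 127) = true)
instance (s : String) : Decidable (Pre_generate_password_resolve_charstring s) := by
  unfold Pre_generate_password_resolve_charstring; infer_instance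

def pvWitness_generate_password_resolve_charstring : String := "ariAe B"

def Spec_generate_password_resolve_charstring (s : String) (out : List Int) : Prop := out = generate_password_resolve_charstring_alt s
instance (s : String) (out : List Int) : Decidable (Spec_generate_password_resolve_charstring s out) := by unfold Spec_generate_password_resolve_charstring; infer_instance

-- ===== CLAIM (what is proved, stated in full; the proofs are below) =====
def Claim_equal_generate_password_resolve_charstring : Prop := ∀ (s : String), Dom_generate_password_resolve_charstring s → Pre_generate_password_resolve_charstring s → Spec_generate_password_resolve_charstring s (generate_password_resolve_charstring s)

-- ===== LEMMAS AND PROOFS =====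

-- the expanded shorthand string `se` that pass 1 of A produces for the head, as a spec function
def expOf : List Char → List Char
  | [] => []
  | c :: rest =>
      (if c = 'a' then (if rest.head? = some 'r' then ['c','l','n','r','s'] else ['c','l','n','p','s'])
       else if c = 'z' then (if rest.head? = some 'r' then ['c','l','n','r'] else ['c','l','n','p'])
       else [c]) ++ expOf rest

-- the identical final step of both ports (set(i) with every element of e discarded)
def finishSet (iL eL : List Int) : List Int :=
  eL.foldl (fun st n => PySem.Set.discard st n) (PySem.Set.ofList iL)

lemma pwC1 : pwRanges.contains 'c' = true := by decide
lemma pwC2 : pwRanges.contains 'l' = true := by decide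
lemma pwC3 : pwRanges.contains 'n' = true := by decide
lemma pwC4 : pwRanges.contains 'p' = true := by decide
lemma pwC5 : pwRanges.contains 'r' = true := by decide
lemma pwC6 : pwRanges.contains 's' = true := by decide
lemma pwCa : pwRanges.contains 'a' = false := by decide
lemma pwCz : pwRanges.contains 'z' = false := by decide

theorem pwExpand_eq (hs ts : List Char)
    (hh : ∀ c ∈ hs, c ∈ (['c','l','n','p','r','s','a','z'] : List Char))
    (ht : ts = [] ∨ ∃ h t, ts = h :: t ∧ (h = 'i' ∨ h = 'e')) :
    pwExpand (hs ++ ts) = some (expOf hs ++ ts) := by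
  induction hs with
  | nil =>
    rcases ht with rfl | ⟨h, t, rfl, hie⟩
    · rfl
    · rcases hie with rfl | rfl <;> simp [pwExpand, expOf]
  | cons c rest ih =>
    have hc := hh c (by simp)
    have ihr := ih (fun x hx => hh x (by simp [hx]))
    fin_cases hc <;>
    simp [pwExpand, expOf, List.cons_append, ihr, pwC1, pwC2, pwC3, pwC4, pwC5, pwC6, pwCa, pwCz] <;>
    (cases rest with
     | nil =>
       have hts : ¬ ts.head? = some 'r' := by
         rcases ht with rfl | ⟨h, t, rfl, hie⟩
         · simp
         · rcases hie with rfl | rfl <;> simp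
       simp [hts]
     | cons d dr => simp)

theorem expOf_mem (hs : List Char)
    (hh : ∀ c ∈ hs, c ∈ (['c','l','n','p','r','s','a','z'] : List Char)) :
    ∀ c ∈ expOf hs, c ∈ (['c','l','n','p','r','s'] : List Char) := by
  induction hs with
  | nil => simp [expOf]
  | cons c rest ih =>
    have hc := hh c (by simp)
    have ihr := ih (fun x hx => hh x (by simp [hx]))
    intro x hx
    by_cases hd : rest.head? = some 'r' <;>
      fin_cases hc <;>
      simp only [expOf, hd, if_true, if_false, List.mem_append] at hx <;>
      (rcases hx with hx | hx
       · simp at hx ⊢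
         tauto
       · exact ihr x hx)

theorem phase1 (xs : List Char) (iL eL : List Int)
    (hx : ∀ c ∈ xs, c ∈ (['c','l','n','p','r','s'] : List Char)) :
    List.foldl pwStep2 (some (none, iL, eL)) xs
      = some (none, iL ++ xs.flatMap (fun c => pwRanges.getD c []), eL) := by
  induction xs generalizing iL with
  | nil => simp
  | cons c rest ih =>
    have hc := hx c (by simp)
    have ihr := fun iL' => ih iL' (fun x hxm => hx x (by simp [hxm]))
    fin_cases hc <;> simp [pwStep2, ihr, List.append_assoc]

theorem pwHead_eq (hs : List Char)
    (hh : ∀ c ∈ hs, c ∈ (['c','l','n','p','r','s','a','z'] : List Char)) :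
    pwHead hs = some ((expOf hs).flatMap (fun c => pwRanges.getD c [])) := by
  induction hs with
  | nil => simp [pwHead, expOf]
  | cons c rest ih =>
    have hc := hh c (by simp)
    have ihr := ih (fun x hx => hh x (by simp [hx]))
    by_cases hd : rest.head? = some 'r' <;>
      fin_cases hc <;>
      simp [pwHead, expOf, ihr, hd, pwC1, pwC2, pwC3, pwC4, pwC5, pwC6, List.append_assoc]

theorem foldl_step2_none (ts : List Char) : List.foldl pwStep2 none ts = none := by
  induction ts with
  | nil => rfl
  | cons c rest ih => simp [List.foldl, pwStep2, ih]

theorem tail_eq (ts : List Char) (m : Bool) (iL eL : List Int) :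
    (match List.foldl pwStep2 (some (some m, iL, eL)) ts with
     | none => []
     | some (_, i, e) => finishSet i e)
      = (match pwTail m iL eL ts with
         | none => []
         | some (i, e) => finishSet i e) := by
  induction ts generalizing m iL eL with
  | nil => rfl
  | cons c rest ih =>
    by_cases hi : c = 'i'
    · simp [pwStep2, pwTail, hi, ih]
    · by_cases he : c = 'e'
      · simp [pwStep2, pwTail, he, ih]
      · by_cases hv : (c.toNat < 32 ∨ 127 < c.toNat)
        · simp [pwStep2, pwTail, hi, he, hv, foldl_step2_none]
        · cases m <;> simp [pwStep2, pwTail, hi, he, hv, ih]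

theorem main_eq (s : String)
    (h1 : ∀ c ∈ s.toList.takeWhile (fun c => ¬ (c = 'i' ∨ c = 'e')),
        c ∈ (['c','l','n','p','r','s','a','z'] : List Char)) :
    generate_password_resolve_charstring s = generate_password_resolve_charstring_alt s := by
  have htail : s.toList.dropWhile (fun c => ¬ (c = 'i' ∨ c = 'e')) = [] ∨
      ∃ h t, s.toList.dropWhile (fun c => ¬ (c = 'i' ∨ c = 'e')) = h :: t ∧ (h = 'i' ∨ h = 'e') := by
    cases hc : s.toList.dropWhile (fun c => ¬ (c = 'i' ∨ c = 'e')) with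
    | nil => exact Or.inl rfl
    | cons x t =>
      right
      refine ⟨x, t, rfl, ?_⟩
      have := List.head?_dropWhile_not
        (p := fun c => decide (¬ (c = 'i' ∨ c = 'e'))) (l := s.toList)
      rw [hc] at this
      simp at this
      tauto
  have hexp : pwExpand s.toList
      = some (expOf (s.toList.takeWhile (fun c => ¬ (c = 'i' ∨ c = 'e')))
              ++ s.toList.dropWhile (fun c => ¬ (c = 'i' ∨ c = 'e'))) := by
    conv_lhs => rw [← List.takeWhile_append_dropWhile
      (p := fun c => decide (¬ (c = 'i' ∨ c = 'e'))) (l := s.toList)]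
    exact pwExpand_eq _ _ h1 htail
  unfold generate_password_resolve_charstring generate_password_resolve_charstring_alt
  rw [hexp]
  dsimp only
  rw [List.foldl_append, phase1 _ [] [] (expOf_mem _ h1), pwHead_eq _ h1]
  simp only [List.nil_append]
  rcases htail with h0 | ⟨h, t, h0, hie⟩ <;> rw [h0]
  · simp [pwTail]
  · rcases hie with rfl | rfl
    ·
      rw [List.foldl_cons]
      have := tail_eq t true
        ((expOf (s.toList.takeWhile (fun c => ¬ (c = 'i' ∨ c = 'e')))).flatMap
          (fun c => pwRanges.getD c [])) []
      simp only [pwStep2, pwTail, finishSet] at this ⊢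
      simpa using this
    ·
      rw [List.foldl_cons]
      have := tail_eq t false
        ((expOf (s.toList.takeWhile (fun c => ¬ (c = 'i' ∨ c = 'e')))).flatMap
          (fun c => pwRanges.getD c [])) []
      simp only [pwStep2, pwTail, finishSet] at this ⊢
      simpa using this

-- ===== VERDICT (by name: the statement is the Claim_ definition above) =====
theorem generate_password_resolve_charstring_spec : Claim_equal_generate_password_resolve_charstring := by
  intro s _ hpre
  unfold Spec_generate_password_resolve_charstring
  have h1 : ∀ c ∈ s.toList.takeWhile (fun c => ¬ (c = 'i' ∨ c = 'e')),
      c ∈ (['c','l','n','p','r','s','a','z'] : List Char) := by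
    simpa [List.all_eq_true] using hpre.1
  exact main_eq s h1
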